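-- pv_equiv track=rewrite | github.com/jw9603/Python | Programmers/코딩기초트레이닝/Day7/5.py | solution
-- ===== SOURCE A (Python) =====
-- def solution(arr):
--     stk = []
--     i = 0
--     for i in range(len(arr)):
--         while stk and stk[-1] >= arr[i]: # 3번 조건
--             stk.pop()
--         stk.append(arr[i]) # 1, 2 번 조건
--
--     return stk
-- ===== SOURCE B (Python) =====
-- def solution(arr):
--     res = []
--     m = None
--     for x in reversed(arr):
--         if m is None or x < m:
--             res.append(x)
--             m = x
--     res.reverse()
--     return res
-- ===== Notes on version B (the rewrite author's own statement) =====
-- stated objective: alternative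
-- what changed: Replaced the left-to-right stack with amortized pops by a single right-to-left pass keeping a running minimum: an element survives iff it is strictly smaller than everything to its right.
import Mathlib
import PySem

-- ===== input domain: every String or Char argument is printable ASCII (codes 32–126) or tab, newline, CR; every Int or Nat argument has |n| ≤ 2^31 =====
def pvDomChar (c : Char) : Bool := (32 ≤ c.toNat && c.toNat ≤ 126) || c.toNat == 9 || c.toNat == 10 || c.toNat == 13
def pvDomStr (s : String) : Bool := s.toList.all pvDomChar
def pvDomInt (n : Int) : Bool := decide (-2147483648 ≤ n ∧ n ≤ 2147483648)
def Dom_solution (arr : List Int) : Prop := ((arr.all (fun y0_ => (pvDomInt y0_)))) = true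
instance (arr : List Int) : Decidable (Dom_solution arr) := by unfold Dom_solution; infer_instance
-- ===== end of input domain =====

-- B replaces A's monotonic stack by a right-to-left running-minimum pass (alternative decomposition, same cost).

-- ===== PORT A =====
-- A's stack is kept top-first (head = stack top): `while stk and stk[-1] >= x: stk.pop()`
-- becomes popGE_solution, `stk.append(x)` becomes cons, and the bottom-to-top list Python
-- returns is the reverse of the top-first stack.
def popGE_solution (stk : List Int) (x : Int) : List Int :=
  match stk with
  | [] => []
  | t :: rest => if t ≥ x then popGE_solution rest x else t :: rest

def solution (arr : List Int) : List Int :=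
  (arr.foldl (fun stk x => x :: popGE_solution stk x) []).reverse

-- ===== PORT B =====
def solution_alt (arr : List Int) : List Int :=
  let p := arr.reverse.foldl
    (fun (p : List Int × Option Int) x =>
      match p.2 with
      | none => (p.1 ++ [x], some x)
      | some m => if x < m then (p.1 ++ [x], some x) else p)
    ([], none)
  p.1.reverse

-- ===== PRECONDITION & SPEC =====
def Spec_solution (arr : List Int) (out : List Int) : Prop := out = solution_alt arr
instance (arr : List Int) (out : List Int) : Decidable (Spec_solution arr out) := by unfold Spec_solution; infer_instance

-- ===== CLAIM (what is proved, stated in full; the proofs are below) =====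
def Claim_equal_solution : Prop := ∀ (arr : List Int), Dom_solution arr → Spec_solution arr (solution arr)

-- ===== LEMMAS AND PROOFS =====

-- common characterisation: an element survives iff it is strictly below everything to its right
def keepMin : List Int → List Int
  | [] => []
  | x :: xs => if xs.all (fun y => decide (x < y)) then x :: keepMin xs else keepMin xs

theorem keepMin_subset {xs : List Int} {y : Int} (h : y ∈ keepMin xs) : y ∈ xs := by
  induction xs with
  | nil => simp [keepMin] at h
  | cons a xs ih =>
    by_cases hc : xs.all (fun y => decide (a < y))
    · simp [keepMin, hc] at h
      rcases h with h | h
      · simp [h]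
      · exact List.mem_cons_of_mem _ (ih h)
    · simp [keepMin, hc] at h
      exact List.mem_cons_of_mem _ (ih h)

theorem keepMin_pairwise (xs : List Int) : (keepMin xs).Pairwise (· < ·) := by
  induction xs with
  | nil => simp [keepMin]
  | cons a xs ih =>
    by_cases hc : xs.all (fun y => decide (a < y))
    · simp only [keepMin, hc, if_pos]
      refine List.Pairwise.cons ?_ ih
      intro y hy
      have := List.all_eq_true.mp hc y (keepMin_subset hy)
      simpa using this
    · simpa [keepMin, hc] using ih

theorem keepMin_append (xs : List Int) (x : Int) :
    keepMin (xs ++ [x]) = (keepMin xs).filter (fun y => decide (y < x)) ++ [x] := by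
  induction xs with
  | nil => simp [keepMin]
  | cons a xs ih =>
    by_cases hax : a < x
    · by_cases hc : xs.all (fun y => decide (a < y))
      · have : ((xs ++ [x]).all (fun y => decide (a < y))) = true := by
          simp_all
        simp [keepMin, this, hc, ih, hax]
      · have : ((xs ++ [x]).all (fun y => decide (a < y))) = false := by
          simp_all
        simp [keepMin, this, hc, ih]
    · have : ((xs ++ [x]).all (fun y => decide (a < y))) = false := by
        simp_all
      by_cases hc : xs.all (fun y => decide (a < y))
      · simp [keepMin, this, hc, ih, hax]
      · simp [keepMin, this, hc, ih]

-- popGE on a strictly decreasing (top-first) stack = filter (· < x)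
theorem popGE_eq_filter (x : Int) :
    ∀ (l : List Int), l.Pairwise (fun a b => b < a) →
      popGE_solution l x = l.filter (fun y => decide (y < x)) := by
  intro l hl
  induction l with
  | nil => simp [popGE_solution]
  | cons t rest ih =>
    rcases List.pairwise_cons.mp hl with ⟨ht, hrest⟩
    by_cases htx : t ≥ x
    · have : ¬ (t < x) := not_lt.mpr htx
      simp [popGE_solution, htx, this, ih hrest]
    · have htx' : t < x := lt_of_not_ge htx
      have : rest.filter (fun y => decide (y < x)) = rest := by
        apply List.filter_eq_self.mpr
        intro y hy
        simpa using lt_trans (ht y hy) htx'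
      simp [popGE_solution, htx, htx', this]

-- A's (top-first) stack after processing arr is (keepMin arr).reverse
theorem stack_eq_keepMin (arr : List Int) :
    arr.foldl (fun stk x => x :: popGE_solution stk x) [] = (keepMin arr).reverse := by
  induction arr using List.reverseRecOn with
  | nil => simp [keepMin]
  | append_singleton xs x ih =>
    rw [List.foldl_append, List.foldl_cons, List.foldl_nil, ih]
    have hdec : ((keepMin xs).reverse).Pairwise (fun a b => b < a) := by
      rw [List.pairwise_reverse]
      exact keepMin_pairwise xs
    rw [popGE_eq_filter x _ hdec, keepMin_append]
    simp [List.filter_reverse]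

theorem solution_eq_keepMin (arr : List Int) : solution arr = keepMin arr := by
  simp [solution, stack_eq_keepMin]

-- minimum as B's fold computes it (left fold over the reversed list = min of the list)
def minOpt : List Int → Option Int
  | [] => none
  | x :: xs =>
    match minOpt xs with
    | none => some x
    | some m => some (if x < m then x else m)

theorem minOpt_none {xs : List Int} : minOpt xs = none ↔ xs = [] := by
  cases xs with
  | nil => simp [minOpt]
  | cons a xs => simp [minOpt]; cases minOpt xs <;> simp

theorem minOpt_le {xs : List Int} {m : Int} (h : minOpt xs = some m) :
    m ∈ xs ∧ ∀ y ∈ xs, m ≤ y := by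
  induction xs generalizing m with
  | nil => simp [minOpt] at h
  | cons a xs ih =>
    cases hm : minOpt xs with
    | none =>
      have : xs = [] := minOpt_none.mp hm
      subst this
      simp [minOpt] at h
      subst h; simp
    | some m' =>
      rcases ih hm with ⟨hmem, hle⟩
      simp [minOpt, hm] at h
      by_cases ham : a < m'
      · simp [ham] at h; subst h
        refine ⟨by simp, ?_⟩
        intro y hy
        rcases List.mem_cons.mp hy with h | h
        · omega
        · exact le_trans (le_of_lt ham) (hle y h)
      · simp [ham] at h; subst h
        refine ⟨List.mem_cons_of_mem _ hmem, ?_⟩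
        intro y hy
        rcases List.mem_cons.mp hy with h | h
        · omega
        · exact hle y h

theorem lt_minOpt_some {xs : List Int} {m : Int} (h : minOpt xs = some m) (x : Int) :
    decide (x < m) = xs.all (fun y => decide (x < y)) := by
  rcases minOpt_le h with ⟨hmem, hle⟩
  by_cases hx : x < m
  · simp [hx]
    intro y hy
    exact lt_of_lt_of_le hx (hle y hy)
  · simp [hx]
    exact ⟨m, hmem, not_lt.mp hx⟩

theorem alt_fold_eq (arr : List Int) :
    arr.reverse.foldl
      (fun (p : List Int × Option Int) x =>
        match p.2 with
        | none => (p.1 ++ [x], some x)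
        | some m => if x < m then (p.1 ++ [x], some x) else p)
      ([], none)
    = ((keepMin arr).reverse, minOpt arr) := by
  induction arr with
  | nil => simp [keepMin, minOpt]
  | cons a xs ih =>
    rw [List.reverse_cons, List.foldl_append, ih, List.foldl_cons, List.foldl_nil]
    cases hm : minOpt xs with
    | none =>
      have hx : xs = [] := minOpt_none.mp hm
      subst hx
      simp [keepMin, minOpt]
    | some m =>
      by_cases ham : a < m
      · have hall : xs.all (fun y => decide (a < y)) = true := by
          rw [← lt_minOpt_some hm a]; simp [ham]
        simp [keepMin, hall, minOpt, hm, ham]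
      · have hall : xs.all (fun y => decide (a < y)) = false := by
          rw [← lt_minOpt_some hm a]; simp [ham]
        simp [keepMin, hall, minOpt, hm, ham]

theorem alt_eq_keepMin (arr : List Int) : solution_alt arr = keepMin arr := by
  unfold solution_alt
  rw [alt_fold_eq]
  simp

-- ===== VERDICT (by name: the statement is the Claim_ definition above) =====
theorem solution_spec : Claim_equal_solution := by
  intro arr _
  unfold Spec_solution
  rw [solution_eq_keepMin, alt_eq_keepMin]
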